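-- pv_equiv track=rewrite | github.com/Mintuka/competitive-programming | week-5/recurssion/code_for_1.py | is_one
-- ===== SOURCE A (Python) =====
-- def is_one(number, index, count):
--     if number <= 1:
--         return number
--     if count//2 + 1 == index:
--         return number%2
--     if index > count//2:
--         index -= (count//2+1)
--     return is_one(number//2, index, count//2)
-- ===== SOURCE B (Python) =====
-- def is_one(number, index, count):
--     if number <= 1:
--         return number
--     levels = number.bit_length() - 1
--     for k in range(levels):
--         half = (count // 2 ** k) // 2
--         if half + 1 == index:
--             return (number // 2 ** k) % 2
--         if index > half:
--             index -= half + 1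
--     return number // 2 ** levels
-- ===== Notes on version B (the rewrite author's own statement) =====
-- stated objective: alternative
-- what changed: Replaces the tail recursion that rebinds number//2 and count//2 each call with a for-loop over the bit levels k in range(number.bit_length()-1), reading shifted views number//2**k and count//2**k and only mutating index.
import Mathlib
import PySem

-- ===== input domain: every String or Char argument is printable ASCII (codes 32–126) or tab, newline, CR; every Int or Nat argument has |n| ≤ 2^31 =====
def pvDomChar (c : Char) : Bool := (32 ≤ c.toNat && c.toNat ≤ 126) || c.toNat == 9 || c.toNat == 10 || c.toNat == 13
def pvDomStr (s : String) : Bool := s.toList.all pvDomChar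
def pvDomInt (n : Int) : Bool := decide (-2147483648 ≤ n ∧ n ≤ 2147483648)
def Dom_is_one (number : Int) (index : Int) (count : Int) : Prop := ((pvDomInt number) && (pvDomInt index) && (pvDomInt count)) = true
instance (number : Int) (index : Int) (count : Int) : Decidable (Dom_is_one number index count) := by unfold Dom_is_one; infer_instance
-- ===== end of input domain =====

-- B replaces the tail recursion that halves number/count by a for-loop over bit levels
-- reading shifted views number//2**k, count//2**k (objective: alternative decomposition).


-- ===== PORT A =====
def is_one (number : Int) (index : Int) (count : Int) : Int :=
  if number ≤ 1 then number
  else if PySem.Int.floordiv count 2 + 1 = index then PySem.Int.mod number 2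
  else
    is_one (PySem.Int.floordiv number 2)
      (if PySem.Int.floordiv count 2 < index then index - (PySem.Int.floordiv count 2 + 1) else index)
      (PySem.Int.floordiv count 2)
termination_by number.toNat
decreasing_by
  simp only [PySem.Int.floordiv_eq_ediv_of_pos (by omega : (0:Int) < 2)]
  omega

-- ===== PORT B =====
-- the for-loop of Source B: ks is the remaining list of levels k, index the loop variable
def isOneLoop (number : Int) (count : Int) (levels : Nat) (ks : List Nat) (index : Int) : Int :=
  match ks with
  | [] => PySem.Int.floordiv number (2 ^ levels)
  | k :: ks =>
    let half := PySem.Int.floordiv (PySem.Int.floordiv count (2 ^ k)) 2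
    if half + 1 = index then PySem.Int.mod (PySem.Int.floordiv number (2 ^ k)) 2
    else isOneLoop number count levels ks (if half < index then index - (half + 1) else index)

def is_one_alt (number : Int) (index : Int) (count : Int) : Int :=
  if number ≤ 1 then number
  else
    let levels := PySem.Int.bitLength number - 1
    isOneLoop number count levels (List.range levels) index

-- ===== PRECONDITION & SPEC =====
def Spec_is_one (number : Int) (index : Int) (count : Int) (out : Int) : Prop := out = is_one_alt number index count
instance (number : Int) (index : Int) (count : Int) (out : Int) : Decidable (Spec_is_one number index count out) := by unfold Spec_is_one; infer_instance

-- ===== CLAIM (what is proved, stated in full; the proofs are below) =====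
def Claim_equal_is_one : Prop := ∀ (number : Int) (index : Int) (count : Int), Dom_is_one number index count → Spec_is_one number index count (is_one number index count)

-- ===== LEMMAS AND PROOFS =====

theorem fdiv_two_fdiv_pow (a : Int) (k : Nat) :
    PySem.Int.floordiv (PySem.Int.floordiv a 2) (2 ^ k) = PySem.Int.floordiv a (2 ^ (k + 1)) := by
  have h2 : (0:Int) < 2 := by omega
  have hk : (0:Int) < 2 ^ k := by positivity
  have hk1 : (0:Int) < 2 ^ (k + 1) := by positivity
  rw [PySem.Int.floordiv_eq_ediv_of_pos h2, PySem.Int.floordiv_eq_ediv_of_pos hk,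
    PySem.Int.floordiv_eq_ediv_of_pos hk1, Int.ediv_ediv_eq_ediv_mul (by positivity)]
  congr 1
  ring

theorem isOneLoop_shift (number count : Int) (L : Nat) (ks : List Nat) (i : Int) :
    isOneLoop number count (L + 1) (ks.map Nat.succ) i
      = isOneLoop (PySem.Int.floordiv number 2) (PySem.Int.floordiv count 2) L ks i := by
  induction ks generalizing i with
  | nil => simpa only [List.map_nil, isOneLoop] using (fdiv_two_fdiv_pow number L).symm
  | cons k ks ih =>
      simp only [List.map_cons, isOneLoop, fdiv_two_fdiv_pow, Nat.succ_eq_add_one]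
      split_ifs <;> simp_all

theorem bitLength_one : PySem.Int.bitLength (1 : Int) = 1 := by decide

theorem is_one_eq_loop (m : Nat) : ∀ (n i c : Int), n.toNat ≤ m → 2 ≤ n →
    is_one n i c
      = isOneLoop n c (PySem.Int.bitLength n - 1)
          (List.range (PySem.Int.bitLength n - 1)) i := by
  induction m with
  | zero => intro n i c hm hn; omega
  | succ m ih =>
    intro n i c hm hn
    have hpos : (0:Int) < n := by omega
    have hbit := PySem.Int.bitLength_of_pos hpos
    have h2 : (0:Int) < 2 := by omega
    have hhalf : PySem.Int.floordiv n 2 = n / 2 := PySem.Int.floordiv_eq_ediv_of_pos h2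
    have hge1 : 1 ≤ n / 2 := by omega
    have hb1 : 1 ≤ PySem.Int.bitLength (PySem.Int.floordiv n 2) := by
      rw [PySem.Int.bitLength_of_pos (by omega : (0:Int) < PySem.Int.floordiv n 2)]; omega
    -- L = bitLength n - 1 = bitLength (n/2) = (bitLength (n/2) - 1) + 1
    have hL : PySem.Int.bitLength n - 1
        = (PySem.Int.bitLength (PySem.Int.floordiv n 2) - 1) + 1 := by omega
    rw [is_one, if_neg (by omega : ¬ n ≤ 1), hL, List.range_succ_eq_map]
    simp only [isOneLoop, pow_zero]
    have h1 : ∀ a : Int, PySem.Int.floordiv a 1 = a := fun a => by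
      rw [PySem.Int.floordiv_eq_ediv_of_pos (by omega : (0:Int) < 1), Int.ediv_one]
    rw [h1, h1]
    have key : ∀ j : Int, is_one (PySem.Int.floordiv n 2) j (PySem.Int.floordiv c 2)
        = isOneLoop n c (PySem.Int.bitLength (PySem.Int.floordiv n 2) - 1 + 1)
            (List.map Nat.succ (List.range (PySem.Int.bitLength (PySem.Int.floordiv n 2) - 1))) j := by
      intro j
      rw [isOneLoop_shift]
      by_cases hsmall : PySem.Int.floordiv n 2 ≤ 1
      · -- n ∈ {2, 3}: n//2 = 1; both sides are n//2
        have h12 : PySem.Int.floordiv n 2 = 1 := by omega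
        rw [h12, is_one, if_pos (by omega : (1:Int) ≤ 1), bitLength_one]
        simp [isOneLoop]
      · -- n ≥ 4: apply the induction hypothesis to n//2
        exact ih _ _ _ (by omega) (by omega)
    by_cases hmid : PySem.Int.floordiv c 2 + 1 = i
    · rw [if_pos hmid, if_pos hmid]
    · rw [if_neg hmid, if_neg hmid]
      exact key _

-- ===== VERDICT (by name: the statement is the Claim_ definition above) =====
theorem is_one_spec : Claim_equal_is_one := by
  intro n i c _
  unfold Spec_is_one is_one_alt
  by_cases h : n ≤ 1
  · rw [is_one, if_pos h, if_pos h]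
  · rw [if_neg h]
    exact is_one_eq_loop n.toNat n i c le_rfl (by omega)
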